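-- pv_equiv track=rewrite | github.com/bsmi021/crewai_escape_room | src/escape_room_sim/simulation/iterative_engine.py | _extract_lessons_learned
-- ===== SOURCE A (Python) =====
-- from typing import Dict, List, Any, Tuple, Optional
--
-- def _extract_lessons_learned(crew_output: str) -> List[str]:
--     """Extract key lessons learned from the iteration output."""
--     lessons = []
--
--     # Look for explicit lesson patterns
--     lesson_patterns = [
--         "learned that",
--         "discovered that",
--         "realized that",
--         "found that",
--         "lesson:"
--     ]
--
--     lines = crew_output.split('\n')
--     for line in lines:
--         line_lower = line.lower().strip()
--         if any(pattern in line_lower for pattern in lesson_patterns):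
--             lessons.append(line.strip())
--
--     # If no explicit lessons, extract key insights
--     if not lessons:
--         key_insights = [
--             line.strip() for line in lines
--             if len(line.strip()) > 20 and
--             any(word in line.lower() for word in ['strategy', 'approach', 'failed', 'worked', 'discovered'])
--         ][:3]  # Limit to 3 key insights
--         lessons.extend(key_insights)
--
--     return lessons
-- ===== SOURCE B (Python) =====
-- def _extract_lessons_learned(crew_output: str):
--     """Extract key lessons learned from the iteration output."""
--     lesson_patterns = (
--         "learned that", "discovered that", "realized that", "found that", "lesson:",
--     )
--     insight_words = ('strategy', 'approach', 'failed', 'worked', 'discovered')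
--     lessons = []
--     insights = []
--     # single pass: classify every line once, decide what to return afterwards
--     for line in crew_output.split('\n'):
--         stripped = line.strip()
--         if any(p in line.lower().strip() for p in lesson_patterns):
--             lessons.append(stripped)
--         elif len(stripped) > 20 and any(w in line.lower() for w in insight_words):
--             insights.append(stripped)
--     return lessons if lessons else insights[:3]
-- ===== Notes on version B (the rewrite author's own statement) =====
-- stated objective: simpler
-- what changed: Replaces A's two separate passes over the lines (lesson loop, then a second insight comprehension) by one loop that classifies each line into a lessons or insights list, choosing between them only at the end.
import Mathlib
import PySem

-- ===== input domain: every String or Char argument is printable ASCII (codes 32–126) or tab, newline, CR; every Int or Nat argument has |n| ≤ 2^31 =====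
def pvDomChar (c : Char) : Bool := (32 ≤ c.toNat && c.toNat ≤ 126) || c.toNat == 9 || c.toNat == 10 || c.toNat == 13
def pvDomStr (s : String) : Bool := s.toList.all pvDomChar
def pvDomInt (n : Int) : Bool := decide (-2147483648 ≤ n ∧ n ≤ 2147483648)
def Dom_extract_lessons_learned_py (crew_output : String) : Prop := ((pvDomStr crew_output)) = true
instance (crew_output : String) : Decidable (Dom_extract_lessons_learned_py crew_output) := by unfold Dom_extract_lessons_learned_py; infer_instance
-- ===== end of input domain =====

-- B replaces A's two passes over the lines (lesson loop, then an insight comprehension)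
-- by one classifying loop with deferred selection; objective: simpler.


-- ===== PORT A =====
def pvLessonPatterns : List String :=
  ["learned that", "discovered that", "realized that", "found that", "lesson:"]

def pvInsightWords : List String :=
  ["strategy", "approach", "failed", "worked", "discovered"]

def extract_lessons_learned_py (crew_output : String) : List String :=
  let lines := ((PySem.Str.split? crew_output "\n").getD [])
  let lessons := lines.foldl (fun lessons line =>
    if pvLessonPatterns.any (fun p =>
        PySem.Str.isIn p (PySem.Str.strip (PySem.Str.lower line))) then
      lessons ++ [PySem.Str.strip line]
    else lessons) []
  if lessons = [] then
    let key_insights := ((lines.filter (fun line =>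
      decide (20 < PySem.Str.len (PySem.Str.strip line)) &&
      pvInsightWords.any (fun w => PySem.Str.isIn w (PySem.Str.lower line)))).map
        (fun line => PySem.Str.strip line)).take 3
    lessons ++ key_insights
  else lessons

-- ===== PORT B =====
def pvIsLesson (line : String) : Bool :=
  pvLessonPatterns.any (fun p => PySem.Str.isIn p (PySem.Str.strip (PySem.Str.lower line)))

def pvIsInsight (line : String) : Bool :=
  decide (20 < PySem.Str.len (PySem.Str.strip line)) &&
  pvInsightWords.any (fun w => PySem.Str.isIn w (PySem.Str.lower line))

def extract_lessons_learned_py_alt (crew_output : String) : List String :=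
  let r := (((PySem.Str.split? crew_output "\n").getD [])).foldl
    (fun (acc : List String × List String) line =>
      let stripped := PySem.Str.strip line
      if pvIsLesson line then (acc.1 ++ [stripped], acc.2)
      else if pvIsInsight line then (acc.1, acc.2 ++ [stripped])
      else acc) ([], [])
  if r.1 = [] then r.2.take 3 else r.1

-- ===== PRECONDITION & SPEC =====
def Spec_extract_lessons_learned_py (crew_output : String) (out : List String) : Prop := out = extract_lessons_learned_py_alt crew_output
instance (crew_output : String) (out : List String) : Decidable (Spec_extract_lessons_learned_py crew_output out) := by unfold Spec_extract_lessons_learned_py; infer_instance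

-- ===== CLAIM (what is proved, stated in full; the proofs are below) =====
def Claim_equal_extract_lessons_learned_py : Prop := ∀ (crew_output : String), Dom_extract_lessons_learned_py crew_output → Spec_extract_lessons_learned_py crew_output (extract_lessons_learned_py crew_output)

-- ===== LEMMAS AND PROOFS =====

/-- B's pair-fold computes the filtered lessons and the filtered (non-lesson) insights. -/
theorem pv_fold_pair (lines : List String) (ls is : List String) :
    lines.foldl (fun (acc : List String × List String) line =>
      let stripped := PySem.Str.strip line
      if pvIsLesson line then (acc.1 ++ [stripped], acc.2)
      else if pvIsInsight line then (acc.1, acc.2 ++ [stripped])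
      else acc) (ls, is)
    = (ls ++ (lines.filter pvIsLesson).map PySem.Str.strip,
       is ++ ((lines.filter (fun l => !pvIsLesson l && pvIsInsight l)).map PySem.Str.strip)) := by
  induction lines generalizing ls is with
  | nil => simp only [List.foldl_nil, List.filter_nil, List.map_nil, List.append_nil]
  | cons x xs ih =>
    simp only [List.foldl_cons, List.filter_cons]
    by_cases hL : pvIsLesson x
    · simp only [hL, if_pos, Bool.not_true, Bool.false_and, Bool.false_eq_true,
        ite_false, List.map_cons, ih, List.append_assoc, List.cons_append, List.nil_append]
    · by_cases hI : pvIsInsight x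
      · simp only [hL, hI, Bool.not_false, Bool.true_and, Bool.false_eq_true, ite_false,
          if_true, ih, List.map_cons, List.append_assoc, List.cons_append, List.nil_append]
      · simp only [hL, hI, Bool.not_false, Bool.true_and, Bool.false_eq_true, ite_false, ih]

/-- If no line is a lesson, the elif-filter equals the plain insight filter. -/
theorem pv_filter_noLesson (lines : List String)
    (h : ∀ l ∈ lines, pvIsLesson l = false) :
    lines.filter (fun l => !pvIsLesson l && pvIsInsight l) = lines.filter pvIsInsight := by
  induction lines with
  | nil => simp only [List.filter_nil]
  | cons x xs ih =>
    have hx := h x (List.mem_cons_self)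
    have ih' := ih (fun l hl => h l (List.mem_cons_of_mem _ hl))
    simp only [List.filter_cons, hx, Bool.not_false, Bool.true_and, ih']

-- ===== VERDICT (by name: the statement is the Claim_ definition above) =====
theorem extract_lessons_learned_py_spec : Claim_equal_extract_lessons_learned_py := by
  intro crew_output _
  simp only [Spec_extract_lessons_learned_py, extract_lessons_learned_py,
    extract_lessons_learned_py_alt]
  set lines := ((PySem.Str.split? crew_output "\n").getD []) with hlines
  rw [pv_fold_pair]
  have hA : lines.foldl (fun lessons line =>
      if pvLessonPatterns.any (fun p =>
          PySem.Str.isIn p (PySem.Str.strip (PySem.Str.lower line))) then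
        lessons ++ [PySem.Str.strip line]
      else lessons) [] = (lines.filter pvIsLesson).map PySem.Str.strip := by
    simpa [pvIsLesson] using
      PySem.List.foldl_append_if (l := lines) (p := pvIsLesson)
        (f := PySem.Str.strip) (acc := [])
  rw [hA]
  simp only [List.nil_append]
  by_cases h : (lines.filter pvIsLesson).map PySem.Str.strip = []
  · have hnil : lines.filter pvIsLesson = [] := List.map_eq_nil_iff.mp h
    have hno : ∀ l ∈ lines, pvIsLesson l = false := by
      intro l hl
      by_contra hc
      have hmem : l ∈ lines.filter pvIsLesson :=
        List.mem_filter.mpr ⟨hl, by simpa using hc⟩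
      simp [hnil] at hmem
    rw [pv_filter_noLesson lines hno, if_pos h, if_pos h, h, List.nil_append]
    rfl
  · rw [if_neg h, if_neg h]
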